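-- pv_equiv track=rewrite | github.com/giordanobruno01/AI | AI_Sentiment_Analysis.py | convertSplit
-- ===== SOURCE A (Python) =====
-- def convertSplit(l):
--     lis = l.split(",")
--     phrase = lis[2:]
--     phrase = (" ".join(phrase)).lower()
--     converted = ""
--     for i in range(len(phrase)):
--         if(phrase[i] == " "):
--             converted = converted +phrase[i]
--         if(phrase[i].isalpha()):
--             converted = converted +phrase[i]
--
--     return converted.split()
-- ===== SOURCE B (Python) =====
-- def convertSplit(l):
--     phrase = (" ".join(l.split(",")[2:])).lower()
--     res = []
--     for piece in phrase.split(' '):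
--         cleaned = ''.join(c for c in piece if c.isalpha())
--         if cleaned:
--             res.append(cleaned)
--     return res
-- ===== Notes on version B (the rewrite author's own statement) =====
-- stated objective: alternative
-- what changed: B splits the lowered phrase on single spaces first and then strips each piece to its alphabetic characters, keeping non-empty results, instead of A's index loop that builds one filtered string character by character and whitespace-splits it at the end.
import Mathlib
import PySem

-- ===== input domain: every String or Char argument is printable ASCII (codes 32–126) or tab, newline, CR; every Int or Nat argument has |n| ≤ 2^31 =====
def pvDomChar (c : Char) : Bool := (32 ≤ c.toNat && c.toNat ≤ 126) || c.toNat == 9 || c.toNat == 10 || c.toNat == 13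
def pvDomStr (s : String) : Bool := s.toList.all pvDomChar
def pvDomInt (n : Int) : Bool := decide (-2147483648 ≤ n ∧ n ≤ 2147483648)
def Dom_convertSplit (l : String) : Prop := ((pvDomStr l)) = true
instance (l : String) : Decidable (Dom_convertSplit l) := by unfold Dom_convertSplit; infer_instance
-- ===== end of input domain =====

-- B tokenises by splitting on ' ' and cleaning each piece to its alphabetic chars, instead of
-- A's flat character loop that builds a filtered string and whitespace-splits it (objective: alternative).


-- ===== PORT A =====
-- lis = l.split(","); phrase = lis[2:]; phrase = (" ".join(phrase)).lower()
-- for i in range(len(phrase)): two sequential ifs appending phrase[i]; return converted.split()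
def convertSplit (l : String) : List String :=
  let lis : List String := (PySem.Chars.splitOn l.toList [',']).map String.ofList
  let phrase : List String := PySem.List.slice lis (some 2) none
  let phraseS : String := PySem.Str.lower (PySem.Str.join " " phrase)
  let converted : List Char :=
    (PySem.List.pyRange 0 (PySem.Str.len phraseS) 1).foldl
      (fun conv i =>
        let c := PySem.List.pyGetD phraseS.toList i ' '
        let conv := if c = ' ' then conv ++ [c] else conv
        if PySem.Chars.isalpha c then conv ++ [c] else conv) []
  (PySem.Chars.split₀ converted).map String.ofList

-- ===== PORT B =====
-- phrase = (" ".join(l.split(",")[2:])).lower(); for piece in phrase.split(' '):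
--   cleaned = ''.join(c for c in piece if c.isalpha()); append cleaned when non-empty
def convertSplit_alt (l : String) : List String :=
  let lis : List String := (PySem.Chars.splitOn l.toList [',']).map String.ofList
  let phraseS : String := PySem.Str.lower (PySem.Str.join " " (PySem.List.slice lis (some 2) none))
  (PySem.Chars.splitOn phraseS.toList [' ']).foldl
    (fun res piece =>
      let cleaned := piece.filter PySem.Chars.isalpha
      if cleaned = [] then res else res ++ [String.ofList cleaned]) []

-- ===== PRECONDITION & SPEC =====
def Spec_convertSplit (l : String) (out : List String) : Prop := out = convertSplit_alt l
instance (l : String) (out : List String) : Decidable (Spec_convertSplit l out) := by unfold Spec_convertSplit; infer_instance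

-- ===== CLAIM (what is proved, stated in full; the proofs are below) =====
def Claim_equal_convertSplit : Prop := ∀ (l : String), Dom_convertSplit l → Spec_convertSplit l (convertSplit l)

-- ===== LEMMAS AND PROOFS =====

-- reference tokenizer: cur is the reversed current cleaned token
def pvToks (cur : List Char) : List Char → List (List Char)
  | [] => if cur = [] then [] else [cur.reverse]
  | c :: r =>
    if c = ' ' then (if cur = [] then pvToks [] r else cur.reverse :: pvToks [] r)
    else if PySem.Chars.isalpha c then pvToks (c :: cur) r else pvToks cur r

-- reference single-char splitter (cur reversed)
def pvSplitChar (d : Char) (cur : List Char) : List Char → List (List Char)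
  | [] => [cur.reverse]
  | c :: r => if c = d then cur.reverse :: pvSplitChar d [] r else pvSplitChar d (c :: cur) r

theorem pv_alpha_not_space (c : Char) (h : PySem.Chars.isalpha c = true) :
    PySem.Chars.isspace c = false := by
  simp [PySem.Chars.isalpha, PySem.Chars.isupper, PySem.Chars.islower] at h
  simp [PySem.Chars.isspace]
  rcases h with h | h <;>
    · have h1 := h.1; have h2 := h.2
      rw [Char.le_def] at h1 h2
      simp [UInt32.le_iff_toNat_le] at h1 h2
      change _ ≤ c.toNat at h1
      change c.toNat ≤ _ at h2
      omega

def pvKeep (c : Char) : Bool := (c = ' ') || PySem.Chars.isalpha c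

theorem pv_loop_eq_filter (cs : List Char) (acc : List Char) :
    cs.foldl (fun conv c =>
      let conv := if c = ' ' then conv ++ [c] else conv
      if PySem.Chars.isalpha c then conv ++ [c] else conv) acc
    = acc ++ cs.filter pvKeep := by
  have hstep : (fun (conv : List Char) (c : Char) =>
      let conv := if c = ' ' then conv ++ [c] else conv
      if PySem.Chars.isalpha c then conv ++ [c] else conv)
      = (fun (conv : List Char) (c : Char) => if pvKeep c = true then conv ++ [id c] else conv) := by
    funext conv c
    by_cases hs : c = ' '
    · subst hs
      simp [pvKeep, show PySem.Chars.isalpha ' ' = false from by decide]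
    · by_cases ha : PySem.Chars.isalpha c = true <;> simp [pvKeep, hs, ha]
  rw [hstep, PySem.List.foldl_append_if pvKeep id]
  simp

theorem pv_split₀_filter (cs : List Char) (cur : List Char) (acc : List (List Char)) :
    PySem.Chars.split₀.go (cs.filter pvKeep) cur acc = acc.reverse ++ pvToks cur cs := by
  induction cs generalizing cur acc with
  | nil => simp [PySem.Chars.split₀.go, pvToks]; split <;> simp_all
  | cons c r ih =>
    by_cases hs : c = ' '
    · subst hs
      rw [show (' ' :: r).filter pvKeep = ' ' :: r.filter pvKeep by simp [pvKeep]]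
      simp only [PySem.Chars.split₀.go]
      rw [show PySem.Chars.isspace ' ' = true by decide]
      simp only [if_true, pvToks]
      by_cases hc : cur = []
      · simp [hc, ih]
      · simp [hc, List.isEmpty_iff, ih]
    · by_cases ha : PySem.Chars.isalpha c = true
      · rw [show (c :: r).filter pvKeep = c :: r.filter pvKeep by simp [pvKeep, ha]]
        simp only [PySem.Chars.split₀.go]
        rw [pv_alpha_not_space c ha]
        simp only [Bool.false_eq_true, if_false, pvToks, hs, ha, if_true]
        simp [ih]
      · rw [show (c :: r).filter pvKeep = r.filter pvKeep by simp [pvKeep, hs, ha]]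
        simp only [pvToks, hs, ha]
        simp [ih]

theorem pv_splitOn_go_singleton (d : Char) (fuel : Nat) (cs cur : List Char)
    (acc : List (List Char)) (h : cs.length < fuel) :
    PySem.Chars.splitOn.go [d] fuel cs cur acc = acc.reverse ++ pvSplitChar d cur cs := by
  induction fuel generalizing cs cur acc with
  | zero => omega
  | succ n ih =>
    cases cs with
    | nil => simp [PySem.Chars.splitOn.go, pvSplitChar]
    | cons c r =>
      simp only [PySem.Chars.splitOn.go, pvSplitChar]
      by_cases hc : c = d
      · subst hc
        rw [show List.isPrefixOf [c] (c :: r) = true by simp [List.isPrefixOf]]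
        simp only [List.length_cons] at *
        rw [ih _ _ _ (by simpa using Nat.lt_of_succ_lt_succ h)]
        simp
      · rw [show List.isPrefixOf [d] (c :: r) = false by
          simp [List.isPrefixOf]; exact fun hh => absurd hh.symm hc]
        simp only [Bool.false_eq_true, if_false, if_neg hc]
        exact ih r (c :: cur) acc (by simp at h ⊢; omega)

theorem pv_splitOn_singleton (d : Char) (cs : List Char) :
    PySem.Chars.splitOn cs [d] = pvSplitChar d [] cs := by
  rw [PySem.Chars.splitOn, pv_splitOn_go_singleton d _ cs [] [] (by omega)]
  simp

theorem pv_bfold (ps : List (List Char)) (acc : List String) :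
    ps.foldl (fun res piece =>
      let cleaned := piece.filter PySem.Chars.isalpha
      if cleaned = [] then res else res ++ [String.ofList cleaned]) acc
    = acc ++ ((ps.map (fun p => p.filter PySem.Chars.isalpha)).filter
        (fun t => t ≠ [])).map String.ofList := by
  induction ps generalizing acc with
  | nil => simp
  | cons p r ih =>
    rw [List.foldl_cons, ih]
    by_cases hp : p.filter PySem.Chars.isalpha = [] <;> simp [hp]

theorem pv_splitChar_toks (cs cur : List Char) :
    ((pvSplitChar ' ' cur cs).map (fun p => p.filter PySem.Chars.isalpha)).filter
        (fun t => t ≠ [])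
    = pvToks (cur.filter PySem.Chars.isalpha) cs := by
  induction cs generalizing cur with
  | nil =>
    simp only [pvSplitChar, pvToks, List.map_cons, List.map_nil, List.filter_cons,
      List.filter_reverse]
    by_cases hc : cur.filter PySem.Chars.isalpha = [] <;> simp [hc]
  | cons c r ih =>
    simp only [pvSplitChar, pvToks]
    by_cases hs : c = ' '
    · subst hs
      by_cases hc : cur.filter PySem.Chars.isalpha = []
      · simpa [hc] using ih []
      · simpa [hc] using ih []
    · by_cases ha : PySem.Chars.isalpha c = true
      · rw [if_neg hs, if_neg hs, if_pos ha, ih]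
        simp [ha]
      · rw [if_neg hs, if_neg hs, if_neg ha, ih]
        simp [ha]

-- ===== VERDICT (by name: the statement is the Claim_ definition above) =====
theorem convertSplit_spec : Claim_equal_convertSplit := by
  intro l _
  unfold Spec_convertSplit convertSplit convertSplit_alt
  simp only []
  set phraseS := PySem.Str.lower (PySem.Str.join " "
    (PySem.List.slice ((PySem.Chars.splitOn l.toList [',']).map String.ofList) (some 2) none))
    with hph
  rw [PySem.Str.len_eq]
  rw [PySem.List.foldl_pyRange_zero_pyGetD' phraseS.toList ' '
    (fun conv c =>
      let conv := if c = ' ' then conv ++ [c] else conv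
      if PySem.Chars.isalpha c then conv ++ [c] else conv) []]
  rw [pv_loop_eq_filter, pv_splitOn_singleton, pv_bfold]
  simp only [List.nil_append]
  rw [PySem.Chars.split₀, pv_split₀_filter]
  rw [pv_splitChar_toks]
  simp
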